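-- pv_equiv track=rewrite | github.com/kgryczan/excelbi_puzzles | Excel/800-899/854/854 Challenge.py | min_num
-- ===== SOURCE A (Python) =====
-- def min_num(n, s):
--     if s < 9:
--         m = "1" + "0" * (n - 2) + str(s - 1)
--     else:
--         digits = []
--         s -= 1
--         while s > 9:
--             digits.append(9)
--             s -= 9
--             n -= 1
--         digits.append(s)
--         n -= 1
--         m = "1" + "0" * (n - 1) + "".join(str(d) for d in digits[::-1])
--     return m
-- ===== SOURCE B (Python) =====
-- def min_num(n, s):
--     if s < 9:
--         return "1" + "0" * (n - 2) + str(s - 1)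
--     t = s - 1
--     k = (t - 1) // 9
--     r = (t - 1) % 9 + 1
--     return "1" + "0" * (n - k - 2) + str(r) + "9" * k
-- ===== Notes on version B (the rewrite author's own statement) =====
-- stated objective: faster
-- what changed: A's while loop that subtracts 9 from s one step at a time (appending a 9 per iteration) is replaced by a closed-form divmod: k=(s-2)//9 nines and final digit (s-2)%9+1, built directly with string repetition.
import Mathlib
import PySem

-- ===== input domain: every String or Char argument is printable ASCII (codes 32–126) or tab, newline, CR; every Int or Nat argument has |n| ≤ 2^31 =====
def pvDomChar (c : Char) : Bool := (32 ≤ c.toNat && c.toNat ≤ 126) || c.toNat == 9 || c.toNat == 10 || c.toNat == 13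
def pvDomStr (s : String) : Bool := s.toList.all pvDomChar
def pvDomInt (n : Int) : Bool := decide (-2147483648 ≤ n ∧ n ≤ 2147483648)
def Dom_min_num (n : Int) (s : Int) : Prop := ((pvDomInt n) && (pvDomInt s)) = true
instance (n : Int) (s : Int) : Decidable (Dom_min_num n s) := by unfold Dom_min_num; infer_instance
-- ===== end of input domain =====

-- B replaces A's subtract-9-at-a-time while loop with a closed-form divmod computation
-- of how many 9s the loop emits and which final digit remains (objective: faster, O(1) arithmetic vs O(s) loop).

-- ===== PORT A =====
-- the while loop: state (s, n, digits); 'while s > 9: digits.append(9); s -= 9; n -= 1', then 'digits.append(s); n -= 1'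
def minNumLoopA (s : Int) (n : Int) (digits : List Int) : List Int × Int :=
  if s > 9 then minNumLoopA (s - 9) (n - 1) (digits ++ [9]) else (digits ++ [s], n - 1)
termination_by s.toNat
decreasing_by omega

-- "0" * m is List.replicate m.toNat '0' (Python gives "" for m ≤ 0, as does toNat); ported by hand, exact.
def min_num (n : Int) (s : Int) : String :=
  if s < 9 then
    String.ofList (['1'] ++ List.replicate (n - 2).toNat '0' ++ PySem.Int.toChars (s - 1))
  else
    let p := minNumLoopA (s - 1) n []
    String.ofList (['1'] ++ List.replicate (p.2 - 1).toNat '0' ++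
      PySem.Chars.join [] (p.1.reverse.map PySem.Int.toChars))

-- ===== PORT B =====
def min_num_alt (n : Int) (s : Int) : String :=
  if s < 9 then
    String.ofList (['1'] ++ List.replicate (n - 2).toNat '0' ++ PySem.Int.toChars (s - 1))
  else
    let t := s - 1
    let k := PySem.Int.floordiv (t - 1) 9
    let r := PySem.Int.mod (t - 1) 9 + 1
    String.ofList (['1'] ++ List.replicate (n - k - 2).toNat '0' ++
      PySem.Int.toChars r ++ List.replicate k.toNat '9')

-- ===== PRECONDITION & SPEC =====
def Spec_min_num (n : Int) (s : Int) (out : String) : Prop := out = min_num_alt n s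
instance (n : Int) (s : Int) (out : String) : Decidable (Spec_min_num n s out) := by unfold Spec_min_num; infer_instance

-- ===== CLAIM (what is proved, stated in full; the proofs are below) =====
def Claim_equal_min_num : Prop := ∀ (n : Int) (s : Int), Dom_min_num n s → Spec_min_num n s (min_num n s)

-- ===== LEMMAS AND PROOFS =====

-- A's loop in closed form: it emits (s-1)/9 nines and the residual digit (s-1)%9+1,
-- decrementing n once per emitted digit.
theorem minNumLoopA_eq (s n : Int) (digits : List Int) (hs : 1 ≤ s) :
    minNumLoopA s n digits =
      (digits ++ List.replicate ((s - 1).ediv 9).toNat 9 ++ [(s - 1).emod 9 + 1],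
       n - (s - 1).ediv 9 - 1) := by
  induction s, n, digits using minNumLoopA.induct with
  | case1 s n digits h ih =>
    rw [minNumLoopA, if_pos h, ih (by omega)]
    have e1 : (9:Int) * ((s - 1).ediv 9) + (s - 1).emod 9 = s - 1 := Int.mul_ediv_add_emod _ _
    have e2 : (9:Int) * ((s - 9 - 1).ediv 9) + (s - 9 - 1).emod 9 = s - 9 - 1 := Int.mul_ediv_add_emod _ _
    have b1 : 0 ≤ (s - 1).emod 9 := Int.emod_nonneg _ (by norm_num)
    have b2 : (s - 1).emod 9 < 9 := Int.emod_lt_of_pos _ (by norm_num)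
    have b3 : 0 ≤ (s - 9 - 1).emod 9 := Int.emod_nonneg _ (by norm_num)
    have b4 : (s - 9 - 1).emod 9 < 9 := Int.emod_lt_of_pos _ (by norm_num)
    have hm : (s - 9 - 1).emod 9 = (s - 1).emod 9 := by omega
    have hkn : ((s - 1).ediv 9).toNat = ((s - 9 - 1).ediv 9).toNat + 1 := by omega
    have hn : n - 1 - (s - 9 - 1).ediv 9 - 1 = n - (s - 1).ediv 9 - 1 := by omega
    rw [hm, hkn, hn, List.replicate_succ]
    simp
  | case2 s n digits h =>
    rw [minNumLoopA, if_neg h]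
    have hk : (s - 1).ediv 9 = 0 := Int.ediv_eq_zero_of_lt (by omega) (by omega)
    have hm : (s - 1).emod 9 = s - 1 := Int.emod_eq_of_lt (by omega) (by omega)
    rw [hk, hm]
    simp

theorem join_nil_flatten (ls : List (List Char)) : PySem.Chars.join [] ls = ls.flatten := by
  induction ls with
  | nil => rfl
  | cons a ls ih =>
    cases ls with
    | nil => simp [PySem.Chars.join, List.intercalate]
    | cons b ls' => rw [PySem.Chars.join_cons_cons, ih]; simp
theorem flatten_replicate_nine (k : Nat) :
    (List.replicate k (['9'] : List Char)).flatten = List.replicate k '9' := by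
  induction k with
  | zero => rfl
  | succ k ih => simp [List.replicate_succ, ih]

-- ===== VERDICT (by name: the statement is the Claim_ definition above) =====
theorem min_num_spec : Claim_equal_min_num := by
  intro n s _
  unfold Spec_min_num min_num min_num_alt
  by_cases h : s < 9
  · rw [if_pos h, if_pos h]
  · rw [if_neg h, if_neg h]
    rw [minNumLoopA_eq (s - 1) n [] (by omega)]
    have hfd : PySem.Int.floordiv (s - 1 - 1) 9 = (s - 1 - 1).ediv 9 :=
      PySem.Int.floordiv_eq_ediv_of_pos (by omega)
    have hmd : PySem.Int.mod (s - 1 - 1) 9 = (s - 1 - 1).emod 9 :=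
      PySem.Int.mod_eq_emod_of_pos (by omega)
    simp only [hfd, hmd]
    congr 1
    have h9 : PySem.Int.toChars 9 = ['9'] := rfl
    have hz : n - (s - 1 - 1).ediv 9 - 1 - 1 = n - (s - 1 - 1).ediv 9 - 2 := by omega
    rw [List.nil_append, List.reverse_append, List.reverse_replicate, List.reverse_singleton,
      List.singleton_append, List.map_append, List.map_replicate, h9, join_nil_flatten,
      List.flatten_append, flatten_replicate_nine, hz]
    simp
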